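-- pv_equiv track=rewrite | github.com/pyomeca/pyorerun | pyorerun/multi_frame_rate_phase_rerun.py | calculate_cumulative_frames
-- ===== SOURCE A (Python) =====
-- def calculate_cumulative_frames(id: int, frame_t_span_idx) -> list[int]:
--     """
--     Calculate the cumulative frames for a given id in the frame_t_span_idx list.
--     Example output for frame_t_span_idx = [0, 0, 1, 1, 2, 2, 2, 3, 3]
--     """
--     cumulative_frames = []
--     counter = 0
--     for frame_idx in frame_t_span_idx:
--         cumulative_frames.append(counter)
--         if id in frame_idx:
--             counter += 1
--     return cumulative_frames
-- ===== SOURCE B (Python) =====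
-- def calculate_cumulative_frames(id: int, frame_t_span_idx) -> list[int]:
--     # two passes: map membership to 0/1 flags, then exclusive prefix sum
--     flags = [int(id in frame_idx) for frame_idx in frame_t_span_idx]
--     prefix = [0]
--     for f in flags:
--         prefix.append(prefix[-1] + f)
--     return prefix[:-1]
-- ===== Notes on version B (the rewrite author's own statement) =====
-- stated objective: alternative
-- what changed: Replaces A's single counter-maintaining loop with a map pass producing a 0/1 membership indicator list followed by a separate exclusive prefix-sum scan.
import Mathlib
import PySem

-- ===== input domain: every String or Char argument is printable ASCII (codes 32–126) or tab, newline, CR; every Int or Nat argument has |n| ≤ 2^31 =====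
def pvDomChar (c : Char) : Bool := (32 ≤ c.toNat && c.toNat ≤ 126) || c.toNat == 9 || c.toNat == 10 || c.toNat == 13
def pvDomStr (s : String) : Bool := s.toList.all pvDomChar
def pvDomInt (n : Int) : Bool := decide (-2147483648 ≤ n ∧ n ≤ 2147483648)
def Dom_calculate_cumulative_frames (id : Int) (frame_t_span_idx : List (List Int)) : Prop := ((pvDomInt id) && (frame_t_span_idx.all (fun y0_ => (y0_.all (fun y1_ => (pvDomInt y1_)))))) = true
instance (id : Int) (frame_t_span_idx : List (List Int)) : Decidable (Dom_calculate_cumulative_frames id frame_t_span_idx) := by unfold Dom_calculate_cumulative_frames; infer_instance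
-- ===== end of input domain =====

-- B separates A's fused counter loop into a membership-indicator map pass plus an exclusive pref-sum scan; same cost, different decomposition.

-- ===== PORT A =====
-- one loop: append current counter, then bump it when id ∈ frame_idx
def calculate_cumulative_frames (id : Int) (frame_t_span_idx : List (List Int)) : List Int :=
  (frame_t_span_idx.foldl
    (fun (st : List Int × Int) frame_idx =>
      (st.1 ++ [st.2], if frame_idx.contains id then st.2 + 1 else st.2))
    ([], 0)).1

-- ===== PORT B =====
-- pass 1: 0/1 flags; pass 2: inclusive pref extended from [0], drop the last
def calculate_cumulative_frames_alt (id : Int) (frame_t_span_idx : List (List Int)) : List Int :=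
  let flags : List Int := frame_t_span_idx.map (fun frame_idx => if frame_idx.contains id then 1 else 0)
  let pref : List Int := flags.foldl (fun acc f => acc ++ [acc.getLast! + f]) [0]
  pref.dropLast

-- ===== PRECONDITION & SPEC =====
def Spec_calculate_cumulative_frames (id : Int) (frame_t_span_idx : List (List Int)) (out : List Int) : Prop := out = calculate_cumulative_frames_alt id frame_t_span_idx
instance (id : Int) (frame_t_span_idx : List (List Int)) (out : List Int) : Decidable (Spec_calculate_cumulative_frames id frame_t_span_idx out) := by unfold Spec_calculate_cumulative_frames; infer_instance

-- ===== CLAIM (what is proved, stated in full; the proofs are below) =====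
def Claim_equal_calculate_cumulative_frames : Prop := ∀ (id : Int) (frame_t_span_idx : List (List Int)), Dom_calculate_cumulative_frames id frame_t_span_idx → Spec_calculate_cumulative_frames id frame_t_span_idx (calculate_cumulative_frames id frame_t_span_idx)

-- ===== LEMMAS AND PROOFS =====

-- A's loop, peeled: result list is acc ++ (the counters emitted from counter c)
theorem foldA_acc (id : Int) (xs : List (List Int)) :
    ∀ (acc : List Int) (c : Int),
      (xs.foldl (fun (st : List Int × Int) frame_idx =>
        (st.1 ++ [st.2], if frame_idx.contains id then st.2 + 1 else st.2)) (acc, c)).1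
      = acc ++ (xs.foldl (fun (st : List Int × Int) frame_idx =>
        (st.1 ++ [st.2], if frame_idx.contains id then st.2 + 1 else st.2)) ([], c)).1 := by
  induction xs with
  | nil => intro acc c; simp
  | cons x xs ih =>
      intro acc c
      simp only [List.foldl_cons, List.nil_append]
      rw [ih (acc ++ [c]), ih [c]]
      simp

theorem getLast!_append_singleton (p : List Int) (c : Int) : (p ++ [c]).getLast! = c := by
  cases p with
  | nil => rfl
  | cons a as => simp [List.getLast!]

-- B's scan, peeled: folding from p ++ [c] extends p with the scan started at [c]
theorem foldB_acc (fs : List Int) :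
    ∀ (p : List Int) (c : Int),
      (fs.foldl (fun acc f => acc ++ [acc.getLast! + f]) (p ++ [c]))
      = p ++ (fs.foldl (fun acc f => acc ++ [acc.getLast! + f]) [c]) := by
  induction fs with
  | nil => intro p c; simp
  | cons f fs ih =>
      intro p c
      simp only [List.foldl_cons]
      rw [getLast!_append_singleton, show (([c] : List Int).getLast! = c) from rfl]
      rw [ih (p ++ [c]) (c + f), ih [c] (c + f)]
      simp

-- B's scan never returns [] from a nonempty start
theorem foldB_ne (fs : List Int) :
    ∀ (p : List Int), p ≠ [] →
      (fs.foldl (fun acc f => acc ++ [acc.getLast! + f]) p) ≠ [] := by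
  induction fs with
  | nil => intro p hp; simpa using hp
  | cons f fs ih =>
      intro p hp
      simp only [List.foldl_cons]
      exact ih _ (by simp)

-- core: A from counter c equals the scan of flags from [c] without its last element
theorem core (id : Int) (xs : List (List Int)) :
    ∀ (c : Int),
      (xs.foldl (fun (st : List Int × Int) frame_idx =>
        (st.1 ++ [st.2], if frame_idx.contains id then st.2 + 1 else st.2)) ([], c)).1
      = ((xs.map (fun frame_idx => if frame_idx.contains id then (1:Int) else 0)).foldl
          (fun acc f => acc ++ [acc.getLast! + f]) [c]).dropLast := by
  induction xs with
  | nil => intro c; simp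
  | cons x xs ih =>
      intro c
      simp only [List.foldl_cons, List.map_cons, List.nil_append]
      rw [foldA_acc id xs [c], show (([c] : List Int).getLast! = c) from rfl]
      have hB := foldB_acc (xs.map (fun frame_idx => if frame_idx.contains id then (1:Int) else 0)) [c]
        (c + (if x.contains id then (1:Int) else 0))
      simp only [List.cons_append, List.nil_append] at hB ⊢
      rw [hB]
      have hflag : (if x.contains id then c + 1 else c) = c + (if x.contains id then (1:Int) else 0) := by
        split <;> simp
      rw [hflag, ih]
      rw [List.dropLast_cons_of_ne_nil (foldB_ne _ _ (by simp))]

-- ===== VERDICT (by name: the statement is the Claim_ definition above) =====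
theorem calculate_cumulative_frames_spec : Claim_equal_calculate_cumulative_frames := by
  intro id xs _
  unfold Spec_calculate_cumulative_frames calculate_cumulative_frames calculate_cumulative_frames_alt
  simpa using core id xs 0
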